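-- pv_equiv track=rewrite | github.com/RomanRetsen/code_clash | walker_tasks/optimal_crag_score.py | crag_score
-- ===== SOURCE A (Python) =====
-- def crag_score(dice, category_card):
--     sorted_dice = tuple(sorted(dice))
--     for category_result, category_combinations \
--             in sorted([(x,y) for x,y in category_card.items() if y[0] == 0], key=lambda x:x[0][1], reverse=True):
--         if sorted_dice in category_combinations[1]:
--             # category_card[category_result][0] == 1
--             return category_result[1]
--     else:
--         return 0
-- ===== SOURCE B (Python) =====
-- def crag_score(dice, category_card):
--     sorted_dice = tuple(sorted(dice))
--     return max((key[1] for key, val in category_card.items()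
--                 if val[0] == 0 and sorted_dice in val[1]),
--                default=0)
-- ===== Notes on version B (the rewrite author's own statement) =====
-- stated objective: simpler
-- what changed: Replaces A's sort-filtered-categories-descending-then-return-first-match loop by a single max-reduction: max(score for (name,score),(flag,combos) in items if flag==0 and sorted dice in combos, default=0); no sort, no early return.
import Mathlib
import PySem

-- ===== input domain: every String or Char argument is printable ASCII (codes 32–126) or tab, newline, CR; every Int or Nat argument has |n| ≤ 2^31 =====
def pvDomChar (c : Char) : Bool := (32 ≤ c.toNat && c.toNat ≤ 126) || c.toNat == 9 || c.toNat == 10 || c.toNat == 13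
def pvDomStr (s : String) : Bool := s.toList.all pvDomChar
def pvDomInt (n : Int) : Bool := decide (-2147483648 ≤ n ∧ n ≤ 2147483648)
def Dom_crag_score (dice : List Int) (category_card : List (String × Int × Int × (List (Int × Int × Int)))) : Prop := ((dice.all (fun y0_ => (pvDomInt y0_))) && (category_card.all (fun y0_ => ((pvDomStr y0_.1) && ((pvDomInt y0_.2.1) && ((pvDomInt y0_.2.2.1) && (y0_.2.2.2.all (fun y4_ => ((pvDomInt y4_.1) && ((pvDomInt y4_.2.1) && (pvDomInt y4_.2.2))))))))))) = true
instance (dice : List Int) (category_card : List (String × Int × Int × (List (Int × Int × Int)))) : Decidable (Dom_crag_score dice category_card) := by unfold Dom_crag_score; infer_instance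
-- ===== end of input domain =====

-- B replaces A's sort-descending-then-first-match by a single max-reduction over the matching
-- scores (default 0) — simpler: no sort, no early return; same value because the first match in
-- the descending order is exactly the maximal matching score.

-- Shared helpers (both Pythons contain these subexpressions verbatim):
-- `tuple(sorted(dice)) in <set of 3-tuples>`: a tuple matches a 3-tuple iff it has length 3 and equal components
def pvTripleMem (sd : List Int) (combos : List (Int × Int × Int)) : Bool :=
  match sd with
  | [a, b, c] => combos.contains (a, b, c)
  | _ => false

-- `category_card.items()`: the dict built from the (key, value) list, key = (name, score), value = (flag, combos)
def pvItems (category_card : List (String × Int × Int × (List (Int × Int × Int)))) :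
    List ((String × Int) × (Int × List (Int × Int × Int))) :=
  (PySem.Dict.ofList (category_card.map (fun e => ((e.1, e.2.1), (e.2.2.1, e.2.2.2))))).items

-- ===== PORT A =====
-- the for/else loop: return the score of the first matching category, else 0
def cragLoopA (sd : List Int) :
    List ((String × Int) × (Int × List (Int × Int × Int))) → Int
  | [] => 0
  | c :: rest => if pvTripleMem sd c.2.2 then c.1.2 else cragLoopA sd rest

def crag_score (dice : List Int) (category_card : List (String × Int × Int × (List (Int × Int × Int)))) : Int :=
  let sorted_dice := PySem.List.sorted dice (fun x => x) false
  cragLoopA sorted_dice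
    (PySem.List.sorted ((pvItems category_card).filter (fun xy => xy.2.1 == 0))
      (fun x => x.1.2) true)

-- ===== PORT B =====
def crag_score_alt (dice : List Int) (category_card : List (String × Int × Int × (List (Int × Int × Int)))) : Int :=
  let sorted_dice := PySem.List.sorted dice (fun x => x) false
  PySem.List.maxD
    ((pvItems category_card).filterMap
      (fun kv => if kv.2.1 == 0 && pvTripleMem sorted_dice kv.2.2 then some kv.1.2 else none))
    (fun x => x) 0

-- ===== PRECONDITION & SPEC =====
def Spec_crag_score (dice : List Int) (category_card : List (String × Int × Int × (List (Int × Int × Int)))) (out : Int) : Prop := out = crag_score_alt dice category_card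
instance (dice : List Int) (category_card : List (String × Int × Int × (List (Int × Int × Int)))) (out : Int) : Decidable (Spec_crag_score dice category_card out) := by unfold Spec_crag_score; infer_instance

-- ===== CLAIM (what is proved, stated in full; the proofs are below) =====
def Claim_equal_crag_score : Prop := ∀ (dice : List Int) (category_card : List (String × Int × Int × (List (Int × Int × Int)))), Dom_crag_score dice category_card → Spec_crag_score dice category_card (crag_score dice category_card)

-- ===== LEMMAS AND PROOFS =====

-- `max(xs, default=0)` only depends on which integers are in the list
lemma maxD_id_congr (xs ys : List Int) (h : ∀ a, a ∈ xs ↔ a ∈ ys) :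
    PySem.List.maxD xs (fun x => x) 0 = PySem.List.maxD ys (fun x => x) 0 := by
  unfold PySem.List.maxD
  cases hx : PySem.List.max? xs (fun x => x) with
  | none =>
      have hxs : xs = [] := (PySem.List.max?_eq_none_iff _ _).mp hx
      have hys : ys = [] := by
        apply List.eq_nil_iff_forall_not_mem.mpr
        intro a ha
        exact absurd ((h a).mpr ha) (by simp [hxs])
      rw [hys, show PySem.List.max? ([] : List Int) (fun x => x) = none from rfl]
  | some m =>
      have hmx : m ∈ xs := PySem.List.max?_mem hx
      have hmax : ∀ y ∈ xs, y ≤ m := PySem.List.max?_isMax hx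
      cases hy : PySem.List.max? ys (fun x => x) with
      | none =>
          have hys : ys = [] := (PySem.List.max?_eq_none_iff _ _).mp hy
          exact absurd ((h m).mp hmx) (by simp [hys])
      | some m' =>
          have hm'y : m' ∈ ys := PySem.List.max?_mem hy
          have hmax' : ∀ y ∈ ys, y ≤ m' := PySem.List.max?_isMax hy
          have := le_antisymm (hmax m' ((h m').mpr hm'y)) (hmax' m ((h m).mp hmx))
          simp [this]

-- B's one-pass filterMap is the filter-then-project pipeline
lemma filterMap_split (sd : List Int) (l : List ((String × Int) × (Int × List (Int × Int × Int)))) :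
    l.filterMap (fun kv => if kv.2.1 == 0 && pvTripleMem sd kv.2.2 then some kv.1.2 else none)
      = (((l.filter (fun kv => kv.2.1 == 0)).filter (fun kv => pvTripleMem sd kv.2.2)).map (fun kv => kv.1.2)) := by
  induction l with
  | nil => rfl
  | cons c t ih =>
      simp only [List.filterMap_cons, List.filter_cons]
      cases h1 : (c.2.1 == 0) <;> cases h2 : pvTripleMem sd c.2.2 <;>
        simp only [h2, Bool.and_true, Bool.and_false, if_true, if_false, Bool.false_eq_true,
          List.filter_cons, List.map_cons, ih]

-- A's first-match over a score-descending list is the max of the matching scores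
lemma loopA_eq_maxD (sd : List Int) (S : List ((String × Int) × (Int × List (Int × Int × Int))))
    (hS : S.Pairwise (fun a b => b.1.2 ≤ a.1.2)) :
    cragLoopA sd S
      = PySem.List.maxD ((S.filter (fun kv => pvTripleMem sd kv.2.2)).map (fun kv => kv.1.2)) (fun x => x) 0 := by
  induction S with
  | nil => rfl
  | cons c t ih =>
      rw [List.pairwise_cons] at hS
      obtain ⟨h1, ht⟩ := hS
      cases hp : pvTripleMem sd c.2.2 with
      | false => simp [cragLoopA, hp, ih ht]
      | true =>
          have hM : ∀ y ∈ (List.filter (fun kv => pvTripleMem sd kv.2.2) t).map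
              (fun kv => kv.1.2), y ≤ c.1.2 := by
            intro y hy
            obtain ⟨kv, hkv, rfl⟩ := List.mem_map.mp hy
            exact h1 kv (List.mem_filter.mp hkv).1
          simp only [cragLoopA, hp, if_true, List.filter_cons, List.map_cons]
          unfold PySem.List.maxD
          rw [PySem.List.max?_id_cons]
          have hfold := PySem.List.le_foldl_max ((List.filter (fun kv => pvTripleMem sd kv.2.2) t).map (fun (kv : (String × Int) × Int × List (Int × Int × Int)) => kv.1.2)) c.1.2
          rcases PySem.List.foldl_max_mem ((List.filter (fun kv => pvTripleMem sd kv.2.2) t).map (fun (kv : (String × Int) × Int × List (Int × Int × Int)) => kv.1.2)) c.1.2 with he | hm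
          · simp [he]
          · simp [le_antisymm (hM _ hm) hfold.1]

-- ===== VERDICT (by name: the statement is the Claim_ definition above) =====
theorem crag_score_spec : Claim_equal_crag_score := by
  intro dice cc _
  unfold Spec_crag_score
  simp only [crag_score, crag_score_alt]
  rw [filterMap_split, loopA_eq_maxD _ _ (PySem.List.sorted_pairwise_rev _ _)]
  apply maxD_id_congr
  intro a
  simp [List.mem_filter, PySem.List.mem_sorted]
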